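-- pv_equiv track=rewrite | github.com/wxxedu/md2anki | Conversions/single_line_md2html.py | bold2cloze
-- ===== SOURCE A (Python) =====
-- def subString(string,position,changeTo):
-- 	new = []
-- 	for s in string:
-- 		new.append(s)
-- 	new[position] = changeTo
-- 	return "".join(new)
--
-- def bold2cloze(line):
-- 	# 判断bold是前面还是后面
-- 	isOpen = True
--
-- 	# 把加粗中的**替换成统一的cloze
-- 	for index in range(0, len(line) - 1):
-- 		if line[index] + line[index+1] == "**":
-- 			if isOpen:
-- 				line = subString(line, index + 1, "¡")
-- 				line = subString(line, index, "¶")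
-- 				isOpen = False
-- 			else:
-- 				line = subString(line, index, "™")
-- 				line = subString(line, index + 1, "¶")
-- 				isOpen = True
-- 	line = line.replace("¡", "<label style = \"font-style: bold;\">{{c*::")
-- 	line = line.replace("™", "}}</label>")
-- 	return line
-- ===== SOURCE B (Python) =====
-- def bold2cloze(line):
--     OPEN = '\u00b6<label style = "font-style: bold;">{{c*::'
--     CLOSE = '}}</label>\u00b6'
--     out = []
--     i = 0
--     is_open = True
--     n = len(line)
--     while i < n:
--         if line[i] == '*' and i + 1 < n and line[i + 1] == '*':
--             out.append(OPEN if is_open else CLOSE)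
--             is_open = not is_open
--             i += 2
--         else:
--             out.append(line[i])
--             i += 1
--     return ''.join(out)
-- ===== Notes on version B (the rewrite author's own statement) =====
-- stated objective: alternative
-- what changed: A repeatedly rewrites the whole string in place (each bold-pair hit rebuilds the string char-by-char twice) and then runs two global replace passes; B does one left-to-right pass that toggles an open/close flag, emits the expanded marker for each double-star pair directly and copies every other character once.
import Mathlib
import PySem

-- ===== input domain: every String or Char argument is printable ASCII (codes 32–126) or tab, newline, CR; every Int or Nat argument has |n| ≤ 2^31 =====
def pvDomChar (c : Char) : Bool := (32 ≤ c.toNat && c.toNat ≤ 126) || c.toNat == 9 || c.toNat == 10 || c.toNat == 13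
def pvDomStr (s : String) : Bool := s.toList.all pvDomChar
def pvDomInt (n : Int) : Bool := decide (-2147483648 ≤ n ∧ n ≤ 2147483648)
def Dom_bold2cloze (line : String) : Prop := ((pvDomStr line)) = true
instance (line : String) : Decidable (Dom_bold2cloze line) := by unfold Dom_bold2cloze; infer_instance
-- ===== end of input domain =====

-- B replaces A's repeated in-place pair rewriting (plus two final replace passes) by a single
-- left-to-right pass that toggles an open/close flag and emits the expanded marker directly.

-- ===== PORT A =====
def subString (string : String) (position : Int) (changeTo : String) : String :=
  -- new = []; for s in string: new.append(s)
  let new := string.toList.map (fun c => String.ofList [c])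
  -- new[position] = changeTo  (every call site of A indexes in range, where pySetD is exact)
  let new := PySem.List.pySetD new position changeTo
  -- "".join(new)
  PySem.Str.join "" new

def bold2clozeStep (st : String × Bool) (index : Int) : String × Bool :=
  let line := st.1
  let isOpen := st.2
  -- line[index] + line[index+1] == "**"  (both indices are in range at every index the loop visits,
  -- so the getD defaults are never used; the concatenation of two 1-char strings is the 2-char list)
  if [(PySem.Str.pyGet? line index).getD ' ', (PySem.Str.pyGet? line (index + 1)).getD ' '] = ['*', '*'] then
    if isOpen then
      let line := subString line (index + 1) "¡"
      let line := subString line index "¶"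
      (line, false)
    else
      let line := subString line index "™"
      let line := subString line (index + 1) "¶"
      (line, true)
  else
    (line, isOpen)

def bold2cloze (line : String) : String :=
  -- for index in range(0, len(line) - 1): …  (isOpen starts True)
  let st := (PySem.List.pyRange 0 (PySem.Str.len line - 1)).foldl bold2clozeStep (line, true)
  let line := st.1
  let line := PySem.Str.replace line "¡" "<label style = \"font-style: bold;\">{{c*::"
  let line := PySem.Str.replace line "™" "}}</label>"
  line

-- ===== PORT B =====
-- one pass over the characters: a "**" pair emits the expanded open/close marker and skips both
-- stars, any other character is copied (mirrors Source B's while-loop with i += 2 / i += 1)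
def bold2clozeAltGo : List Char → Bool → List Char
  | [], _ => []
  | [c], _ => [c]
  | c :: c' :: rest, isOpen =>
    if c = '*' ∧ c' = '*' then
      (if isOpen then "¶<label style = \"font-style: bold;\">{{c*::".toList
       else "}}</label>¶".toList) ++ bold2clozeAltGo rest (!isOpen)
    else
      c :: bold2clozeAltGo (c' :: rest) isOpen

def bold2cloze_alt (line : String) : String :=
  String.ofList (bold2clozeAltGo line.toList true)

-- ===== PRECONDITION & SPEC =====
def Spec_bold2cloze (line : String) (out : String) : Prop := out = bold2cloze_alt line
instance (line : String) (out : String) : Decidable (Spec_bold2cloze line out) := by unfold Spec_bold2cloze; infer_instance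

-- ===== CLAIM (what is proved, stated in full; the proofs are below) =====
def Claim_equal_bold2cloze : Prop := ∀ (line : String), Dom_bold2cloze line → Spec_bold2cloze line (bold2cloze line)

-- ===== LEMMAS AND PROOFS =====

-- the marked string A's loop produces before the two replace passes, plus the final flag
def markGo : List Char → Bool → List Char × Bool
  | [], b => ([], b)
  | [c], b => ([c], b)
  | c :: c' :: rest, b =>
    if c = '*' ∧ c' = '*' then
      let r := markGo rest (!b)
      ((if b then ['¶', '¡'] else ['™', '¶']) ++ r.1, r.2)
    else
      let r := markGo (c' :: rest) b
      (c :: r.1, r.2)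

theorem join_nil_singletons : ∀ (l : List Char), PySem.Chars.join [] (l.map fun c => [c]) = l
  | [] => rfl
  | [c] => rfl
  | a :: b :: t => by
    have ih := join_nil_singletons (b :: t)
    simp [PySem.Chars.join, List.intercalate] at ih ⊢
    exact ih

theorem subString_toList (s : String) (p : Nat) (c : Char) :
    (subString s (p : Int) (String.ofList [c])).toList = s.toList.set p c := by
  unfold subString
  simp [PySem.Str.toList_join]
  have hm : List.map (String.toList ∘ fun c => String.ofList [c]) s.toList
      = s.toList.map (fun a => [a]) := by simp [Function.comp]
  rw [hm, show [c] = (fun a : Char => [a]) c from rfl, ← List.map_set, join_nil_singletons]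

theorem replace_go_single (o : Char) (new : List Char) :
    ∀ (l acc : List Char) (fuel : Nat), l.length ≤ fuel →
      PySem.Chars.replace.go [o] new fuel l acc
        = acc.reverse ++ l.flatMap (fun c => if c = o then new else [c])
  | [], acc, fuel, _ => by
    cases fuel <;> simp [PySem.Chars.replace.go]
  | c :: t, acc, fuel + 1, h => by
    have ih := replace_go_single o new t
    simp only [PySem.Chars.replace.go, List.isPrefixOf, List.flatMap_cons]
    by_cases hc : o = c
    · subst hc
      simp only [BEq.rfl, Bool.true_and, if_pos, List.length_cons, List.length_nil,
        List.drop_succ_cons, List.drop_zero]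
      rw [ih _ fuel (by simpa using h)]
      simp
    · rw [if_neg (by simp [hc])]
      rw [ih (c :: acc) fuel (by simpa using h)]
      simp [Ne.symm hc]

theorem replace_single (o : Char) (new : List Char) (l : List Char) :
    PySem.Chars.replace l [o] new = l.flatMap (fun c => if c = o then new else [c]) := by
  simp [PySem.Chars.replace]
  rw [replace_go_single o new l [] l.length (le_refl _)]
  simp

theorem loopA : ∀ (τ d : List Char) (b : Bool),
    (PySem.List.pyRange (d.length : Int) ((d.length : Int) + (τ.length : Int) - 1)).foldl
        bold2clozeStep (String.ofList (d ++ τ), b)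
      = (String.ofList (d ++ (markGo τ b).1), (markGo τ b).2)
  | [], d, b => by
    rw [PySem.List.pyRange_one_eq_nil (by simp)]
    simp [markGo]
  | [c], d, b => by
    rw [PySem.List.pyRange_one_eq_nil (by simp)]
    simp [markGo]
  | c :: c' :: rest, d, b => by
    have hcast : (d.length : Int) + 1 = ((d.length + 1 : Nat) : Int) := by push_cast; ring
    have hlt : (d.length : Int) < (d.length : Int) + ((c :: c' :: rest).length : Int) - 1 := by
      simp; omega
    rw [PySem.List.pyRange_one_cons hlt, List.foldl_cons]
    have h1 : (PySem.Str.pyGet? (String.ofList (d ++ c :: c' :: rest)) (d.length : Int)).getD ' ' = c := by simp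
    have h2 : (PySem.Str.pyGet? (String.ofList (d ++ c :: c' :: rest)) ((d.length : Int) + 1)).getD ' ' = c' := by
      rw [hcast, PySem.Str.pyGet?_natCast]; simp
    by_cases hm : c = '*' ∧ c' = '*'
    · obtain ⟨hc, hc'⟩ := hm
      subst hc hc'
      have hstep : bold2clozeStep (String.ofList (d ++ '*' :: '*' :: rest), b) (d.length : Int)
          = (String.ofList (d ++ (if b then '¶' :: '¡' :: rest else '™' :: '¶' :: rest)), !b) := by
        unfold bold2clozeStep
        dsimp only
        rw [h1, h2, if_pos rfl]
        cases b with
        | false =>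
          rw [if_neg (by simp)]
          refine Prod.ext ?_ (by simp)
          dsimp only
          rw [← String.toList_inj]
          rw [show ("¶" : String) = String.ofList ['¶'] from rfl,
              show ("™" : String) = String.ofList ['™'] from rfl]
          rw [hcast, subString_toList, subString_toList]
          simp
        | true =>
          rw [if_pos rfl]
          refine Prod.ext ?_ (by simp)
          dsimp only
          rw [← String.toList_inj]
          rw [show ("¶" : String) = String.ofList ['¶'] from rfl,
              show ("¡" : String) = String.ofList ['¡'] from rfl]
          rw [hcast, subString_toList, subString_toList]
          simp
      rw [hstep]
      have hmg : markGo ('*' :: '*' :: rest) b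
          = ((if b then ['¶', '¡'] else ['™', '¶']) ++ (markGo rest (!b)).1, (markGo rest (!b)).2) := by
        simp [markGo]
      rw [hmg]
      cases rest with
      | nil =>
        rw [PySem.List.pyRange_one_eq_nil (by simp; omega)]
        cases b <;> simp [markGo]
      | cons r rs =>
        have hlt2 : (d.length : Int) + 1 < (d.length : Int) + ((('*' :: '*' :: r :: rs : List Char)).length : Int) - 1 := by
          simp; omega
        rw [PySem.List.pyRange_one_cons hlt2, List.foldl_cons]
        have ihcast1 : (((d ++ (if b then ['¶', '¡'] else ['™', '¶'])).length : Nat) : Int)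
            = (d.length : Int) + 1 + 1 := by cases b <;> (simp; ring)
        have ih := loopA (r :: rs) (d ++ (if b then ['¶', '¡'] else ['™', '¶'])) (!b)
        rw [ihcast1] at ih
        have ihb : (d.length : Int) + 1 + 1 + (((r :: rs : List Char).length : Nat) : Int) - 1
            = (d.length : Int) + ((('*' :: '*' :: r :: rs : List Char)).length : Int) - 1 := by
          simp; ring
        rw [ihb] at ih
        have hstep2 : bold2clozeStep
            (String.ofList (d ++ (if b then '¶' :: '¡' :: r :: rs else '™' :: '¶' :: r :: rs)), !b)
            ((d.length : Int) + 1)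
            = (String.ofList (d ++ (if b then '¶' :: '¡' :: r :: rs else '™' :: '¶' :: r :: rs)), !b) := by
          unfold bold2clozeStep
          dsimp only
          rw [if_neg ?_]
          cases b with
          | false =>
            rw [hcast, PySem.Str.pyGet?_natCast]
            simp
          | true =>
            rw [hcast, PySem.Str.pyGet?_natCast]
            simp
        have hli : d ++ (if b then '¶' :: '¡' :: r :: rs else '™' :: '¶' :: r :: rs)
            = (d ++ (if b then ['¶', '¡'] else ['™', '¶'])) ++ (r :: rs) := by
          cases b <;> simp
        rw [show (d ++ if b then '¶' :: '¡' :: r :: rs else '™' :: '¶' :: r :: rs)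
              = (d ++ (if b then ['¶', '¡'] else ['™', '¶'])) ++ (r :: rs) from hli] at hstep2 ⊢
        rw [hstep2, ih]
        cases b <;> simp
    · rw [show bold2clozeStep (String.ofList (d ++ c :: c' :: rest), b) (d.length : Int)
            = (String.ofList (d ++ c :: c' :: rest), b) from by
          unfold bold2clozeStep
          dsimp only
          rw [h1, h2, if_neg (by simpa using hm)]]
      have ih := loopA (c' :: rest) (d ++ [c]) b
      have ihc : (((d ++ [c]).length : Nat) : Int) = (d.length : Int) + 1 := by simp
      rw [ihc] at ih
      have ihb : (d.length : Int) + 1 + (((c' :: rest : List Char).length : Nat) : Int) - 1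
          = (d.length : Int) + ((c :: c' :: rest : List Char).length : Int) - 1 := by
        simp; ring
      rw [ihb] at ih
      rw [show d ++ c :: c' :: rest = (d ++ [c]) ++ (c' :: rest) from by simp] 
      rw [ih]
      have hmg : markGo (c :: c' :: rest) b
          = (c :: (markGo (c' :: rest) b).1, (markGo (c' :: rest) b).2) := by
        simp [markGo, hm]
      rw [hmg]
      simp
termination_by τ => τ.length

theorem dom_plain (c : Char) (h : pvDomChar c = true) :
    (if c = '¡' then "<label style = \"font-style: bold;\">{{c*::".toList else [c]).flatMap
        (fun c => if c = '™' then "}}</label>".toList else [c]) = [c] := by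
  have h1 : c ≠ '¡' := by rintro rfl; simp [pvDomChar] at h
  have h2 : c ≠ '™' := by rintro rfl; simp [pvDomChar] at h
  simp [h1, h2]

theorem expand_markGo : ∀ (τ : List Char) (b : Bool), (∀ c ∈ τ, pvDomChar c = true) →
    ((markGo τ b).1.flatMap
        (fun c => if c = '¡' then "<label style = \"font-style: bold;\">{{c*::".toList else [c])).flatMap
        (fun c => if c = '™' then "}}</label>".toList else [c])
      = bold2clozeAltGo τ b
  | [], b, _ => rfl
  | [c], b, h => by
    simp only [markGo, bold2clozeAltGo, List.flatMap_cons, List.flatMap_nil, List.append_nil]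
    rw [dom_plain c (h c (by simp))]
  | c :: c' :: rest, b, h => by
    by_cases hm : c = '*' ∧ c' = '*'
    · obtain ⟨hc, hc'⟩ := hm
      subst hc hc'
      have ih := expand_markGo rest (!b) (fun x hx => h x (by simp [hx]))
      cases b <;>
        (simp only [Bool.not_false, Bool.not_true] at ih
         simp only [markGo, bold2clozeAltGo, and_self, reduceIte, Bool.false_eq_true,
           Bool.not_false, Bool.not_true, List.flatMap_append]
         rw [ih]
         congr 1)
    · have ih := expand_markGo (c' :: rest) b (fun x hx => h x (by simp at hx ⊢; tauto))
      simp only [markGo, bold2clozeAltGo, if_neg hm]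
      simp only [List.flatMap_cons]
      rw [show (if c = '¡' then "<label style = \"font-style: bold;\">{{c*::".toList else [c]) ++
            List.flatMap _ (markGo (c' :: rest) b).1
          = _ from rfl]
      rw [List.flatMap_append, ih, dom_plain c (h c (by simp))]
      rfl
termination_by τ => τ.length

-- ===== VERDICT (by name: the statement is the Claim_ definition above) =====
theorem bold2cloze_spec : Claim_equal_bold2cloze := by
  intro line hDom
  unfold Spec_bold2cloze bold2cloze bold2cloze_alt
  dsimp only
  have hl := loopA line.toList [] true
  simp only [List.nil_append, List.length_nil, Nat.cast_zero] at hl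
  rw [show String.ofList line.toList = line from String.ofList_toList] at hl
  have hb : PySem.Str.len line - 1 = (0 : Int) + (line.toList.length : Int) - 1 := by
    rw [PySem.Str.len_eq]; ring
  rw [hb, hl, ← String.toList_inj, PySem.Str.toList_replace, PySem.Str.toList_replace,
    show ("¡" : String).toList = ['¡'] from rfl, show ("™" : String).toList = ['™'] from rfl,
    replace_single, replace_single]
  simp only [String.toList_ofList]
  have he := expand_markGo line.toList true (fun c hc => List.all_eq_true.mp hDom c hc)
  rw [he]
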